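-- pv_equiv track=rewrite | github.com/mr-/aoc_2021 | 5/solution.py | count_dups
-- ===== SOURCE A (Python) =====
-- def count_dups(points):
--     seen = {}
--     dups = {}
--     for point in points:
--         if point in seen:
--             dups[point] = 1
--         seen[point] = 1
--     return dups.keys()
-- ===== SOURCE B (Python) =====
-- def count_dups(points):
--     # A point belongs to the result exactly at its second occurrence:
--     # the position i where the prefix before i contains it exactly once.
--     return [p for i, p in enumerate(points) if points[:i].count(p) == 1]
-- ===== Notes on version B (the rewrite author's own statement) =====
-- stated objective: simpler
-- what changed: Replaces A's two mutable dicts (seen-set plus mark-on-second-sighting) with a single stateless comprehension that keeps a point exactly at the index where the prefix before it contains it exactly once (its second occurrence).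
import Mathlib
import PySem

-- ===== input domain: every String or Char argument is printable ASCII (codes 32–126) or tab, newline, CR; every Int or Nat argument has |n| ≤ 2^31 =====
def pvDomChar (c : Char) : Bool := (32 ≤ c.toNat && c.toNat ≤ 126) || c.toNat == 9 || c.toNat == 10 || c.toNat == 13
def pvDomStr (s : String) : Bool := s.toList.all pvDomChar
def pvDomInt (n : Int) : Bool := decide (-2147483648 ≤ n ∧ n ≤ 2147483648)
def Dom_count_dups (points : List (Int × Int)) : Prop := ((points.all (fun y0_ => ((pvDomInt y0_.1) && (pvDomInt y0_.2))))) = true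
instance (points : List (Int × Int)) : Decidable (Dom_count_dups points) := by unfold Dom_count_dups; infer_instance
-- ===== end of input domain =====

-- B replaces A's seen/dups dict loop with one stateless prefix-counting comprehension (simpler; not faster).

-- ===== PORT A =====
-- loop body: if point in seen: dups[point] = 1; seen[point] = 1
def count_dups_step (st : PySem.Dict (Int × Int) Int × PySem.Dict (Int × Int) Int)
    (point : Int × Int) : PySem.Dict (Int × Int) Int × PySem.Dict (Int × Int) Int :=
  let dups := if st.1.contains point then st.2.insert point 1 else st.2
  (st.1.insert point 1, dups)

def count_dups (points : List (Int × Int)) : List (Int × Int) :=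
  let st := points.foldl count_dups_step (PySem.Dict.empty, PySem.Dict.empty)
  st.2.keys

-- ===== PORT B =====
-- [p for i, p in enumerate(points) if points[:i].count(p) == 1]
def count_dups_alt (points : List (Int × Int)) : List (Int × Int) :=
  (PySem.List.enumerate points).filterMap (fun ip =>
    if PySem.List.count (PySem.List.slice points (some 0) (some ip.1)) ip.2 = 1 then some ip.2
    else none)

-- ===== PRECONDITION & SPEC =====
def Spec_count_dups (points : List (Int × Int)) (out : List (Int × Int)) : Prop := out = count_dups_alt points
instance (points : List (Int × Int)) (out : List (Int × Int)) : Decidable (Spec_count_dups points out) := by unfold Spec_count_dups; infer_instance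

-- ===== CLAIM (what is proved, stated in full; the proofs are below) =====
def Claim_equal_count_dups : Prop := ∀ (points : List (Int × Int)), Dom_count_dups points → Spec_count_dups points (count_dups points)

-- ===== LEMMAS AND PROOFS =====

theorem count_dups_step_snd (st : PySem.Dict (Int × Int) Int × PySem.Dict (Int × Int) Int)
    (p : Int × Int) :
    (count_dups_step st p).2 = if st.1.contains p then st.2.insert p 1 else st.2 := rfl

-- the seen-dict component of the fold does not depend on the dups component
theorem count_dups_fst_fold (l : List (Int × Int))
    (s d : PySem.Dict (Int × Int) Int) :
    (l.foldl count_dups_step (s, d)).1 = l.foldl (fun s x => s.insert x 1) s := by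
  induction l generalizing s d with
  | nil => rfl
  | cons x xs ih => simp [List.foldl_cons, count_dups_step, ih]

theorem count_dups_seen_contains (l : List (Int × Int))
    (d : PySem.Dict (Int × Int) Int) (p : Int × Int) :
    ((l.foldl count_dups_step (PySem.Dict.empty, d)).1).contains p = decide (p ∈ l) := by
  rw [count_dups_fst_fold]
  rw [PySem.Dict.contains_eq_decide_mem_keys]
  rw [PySem.Dict.keys_foldl_insert]
  simp [PySem.Dict.keys_empty, PySem.Set.update, ← PySem.Set.ofList_eq_foldl,
    PySem.Set.mem_ofList]

-- B on a list extended by one element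
theorem count_dups_alt_append (pre : List (Int × Int)) (p : Int × Int) :
    count_dups_alt (pre ++ [p]) =
      count_dups_alt pre ++ (if pre.count p = 1 then [p] else []) := by
  unfold count_dups_alt
  rw [PySem.List.enumerate_append, List.filterMap_append]
  congr 1
  · apply List.filterMap_congr
    intro a ha
    rcases (PySem.List.mem_enumerate_iff pre 0 a).1 ha with ⟨k, hk, rfl⟩
    simp only [zero_add]
    have h1 : PySem.List.slice (pre ++ [p]) (some 0) (some (k : Int)) =
        PySem.List.slice pre (some 0) (some (k : Int)) := by
      simp only [PySem.List.slice_zero_start, PySem.List.slice_to_natCast]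
      rw [List.take_append_of_le_length (le_of_lt hk)]
    rw [h1]
  · simp only [PySem.List.enumerate_cons, PySem.List.enumerate_nil, List.filterMap_cons,
      List.filterMap_nil, zero_add]
    have h2 : PySem.List.slice (pre ++ [p]) (some 0) (some (pre.length : Int)) = pre := by
      simp only [PySem.List.slice_zero_start, PySem.List.slice_to_natCast]
      exact List.take_left
    rw [h2, PySem.List.count_eq]
    split_ifs <;> rfl

-- combined invariant, by induction on the list from the right
theorem count_dups_main (pre : List (Int × Int)) :
    count_dups pre = count_dups_alt pre ∧
      (∀ q, q ∈ count_dups_alt pre ↔ 2 ≤ pre.count q) := by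
  induction pre using List.reverseRecOn with
  | nil => exact ⟨rfl, by simp [count_dups_alt, PySem.List.enumerate_nil]⟩
  | append_singleton pre p ih =>
    obtain ⟨ihA, ihM⟩ := ih
    have haltapp := count_dups_alt_append pre p
    have hfold : (pre ++ [p]).foldl count_dups_step (PySem.Dict.empty, PySem.Dict.empty) =
        count_dups_step (pre.foldl count_dups_step (PySem.Dict.empty, PySem.Dict.empty)) p := by
      rw [List.foldl_append]; rfl
    have hkeys : (pre.foldl count_dups_step (PySem.Dict.empty, PySem.Dict.empty)).2.keys
        = count_dups_alt pre := ihA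
    have hA : count_dups (pre ++ [p]) = count_dups_alt (pre ++ [p]) := by
      have hkey : count_dups (pre ++ [p]) =
          ((count_dups_step (pre.foldl count_dups_step (PySem.Dict.empty, PySem.Dict.empty)) p).2).keys := by
        simp only [count_dups]; rw [hfold]
      rw [hkey, count_dups_step_snd, count_dups_seen_contains]
      by_cases hmem : p ∈ pre
      · simp only [hmem, decide_true, if_true]
        have hc : ((pre.foldl count_dups_step (PySem.Dict.empty, PySem.Dict.empty)).2).contains p
            = decide (2 ≤ pre.count p) := by
          rw [PySem.Dict.contains_eq_decide_mem_keys, hkeys]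
          simp [ihM p]
        by_cases h2 : 2 ≤ pre.count p
        · have hct : ((pre.foldl count_dups_step (PySem.Dict.empty, PySem.Dict.empty)).2).contains p = true := by
            rw [hc]; simp [h2]
          rw [PySem.Dict.keys_insert_of_contains _ _ hct, hkeys, haltapp]
          have hne : ¬ pre.count p = 1 := by omega
          simp [hne]
        · have hone : pre.count p = 1 := by
            have := List.count_pos_iff.2 hmem
            omega
          have hcf : ((pre.foldl count_dups_step (PySem.Dict.empty, PySem.Dict.empty)).2).contains p = false := by
            rw [hc]; simp; omega
          rw [PySem.Dict.keys_insert_of_not_contains _ _ hcf, hkeys, haltapp]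
          simp [hone]
      · simp only [hmem, decide_false, Bool.false_eq_true, if_false]
        rw [hkeys, haltapp]
        have h0 : pre.count p = 0 := List.count_eq_zero.2 hmem
        simp [h0]
    refine ⟨hA, ?_⟩
    intro q
    rw [haltapp, List.mem_append, ihM q, List.count_append]
    by_cases hq : q = p
    · subst hq
      have hc1 : List.count q [q] = 1 := by simp
      rw [hc1]
      by_cases h1 : pre.count q = 1
      · simp [h1]
      · rw [if_neg h1]
        simp only [List.not_mem_nil, or_false]
        omega
    · have hc1 : List.count q [p] = 0 := by
        simp [Ne.symm hq]
      rw [hc1]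
      split_ifs with h1 <;> simp [hq]

-- ===== VERDICT (by name: the statement is the Claim_ definition above) =====
theorem count_dups_spec : Claim_equal_count_dups := by
  intro points _
  exact (count_dups_main points).1
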